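-- pv_equiv track=rewrite | github.com/suraj021617/smartsuraj | utils/grid_generator.py | generate_grid_from_number
-- ===== SOURCE A (Python) =====
-- def generate_grid_from_number(number_str):
--     # Ensure the number is a 4-digit string
--     if len(number_str) != 4 or not number_str.isdigit():
--         return None
--
--     formula_map = {'0': 5, '1': 6, '2': 7, '3': 8, '4': 9,
--                    '5': 0, '6': 1, '7': 2, '8': 3, '9': 4}
--
--     grid = [[int(d) for d in number_str]]
--     second_row = [formula_map[d] for d in number_str]
--     third_row = [(x + 1) % 10 for x in second_row]
--     fourth_row = [(x + 2) % 10 for x in second_row]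
--     grid.extend([second_row, third_row, fourth_row])
--     return grid
-- ===== SOURCE B (Python) =====
-- # Column-major construction: each digit char maps (via a precomputed table) to
-- # its entire 4-entry grid column; the grid is the transpose of those columns.
-- _COLUMN = {str(v): (v, (v + 5) % 10, (v + 6) % 10, (v + 7) % 10) for v in range(10)}
--
--
-- def generate_grid_from_number(number_str):
--     # Ensure the number is a 4-digit string
--     if len(number_str) != 4 or not number_str.isdigit():
--         return None
--     cols = [_COLUMN[d] for d in number_str]
--     return [list(row) for row in zip(*cols)]
-- ===== Notes on version B (the rewrite author's own statement) =====
-- stated objective: alternative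
-- what changed: Replaced A's row-major construction (formula_map second row, third/fourth rows chained from it) with a column-major one: a precomputed table maps each digit to its whole 4-entry column and the grid is the transpose (zip) of the four columns.
import Mathlib
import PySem

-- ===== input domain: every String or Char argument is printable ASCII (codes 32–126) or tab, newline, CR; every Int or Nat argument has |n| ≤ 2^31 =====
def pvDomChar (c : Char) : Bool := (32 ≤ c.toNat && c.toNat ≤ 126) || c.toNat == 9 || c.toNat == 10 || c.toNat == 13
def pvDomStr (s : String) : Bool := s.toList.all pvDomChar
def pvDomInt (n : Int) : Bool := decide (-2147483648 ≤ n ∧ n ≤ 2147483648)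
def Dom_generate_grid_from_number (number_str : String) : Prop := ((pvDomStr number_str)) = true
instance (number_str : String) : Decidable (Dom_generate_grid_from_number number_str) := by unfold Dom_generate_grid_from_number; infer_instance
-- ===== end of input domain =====

-- B builds the grid column-major: a precomputed table maps each digit to its whole
-- 4-entry column and the grid is the transpose of the four columns; objective: alternative.
-- ===== PORT A =====
def pvFormulaMap : PySem.Dict Char Int :=
  PySem.Dict.ofList [('0', 5), ('1', 6), ('2', 7), ('3', 8), ('4', 9),
                     ('5', 0), ('6', 1), ('7', 2), ('8', 3), ('9', 4)]

def generate_grid_from_number (number_str : String) : Option (List (List Int)) :=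
  if number_str.toList.length ≠ 4 ∨ ¬ (PySem.Chars.strIsdigit number_str.toList = true) then
    none
  else
    -- guard guarantees every d is an ASCII digit, so int(d) succeeds and d is a key of the map
    let grid := [number_str.toList.map (fun d => (PySem.Int.ofChars? [d]).getD 0)]
    let second_row := number_str.toList.map (fun d => (pvFormulaMap.get? d).getD 0)
    let third_row := second_row.map (fun x => PySem.Int.mod (x + 1) 10)
    let fourth_row := second_row.map (fun x => PySem.Int.mod (x + 2) 10)
    some (grid ++ [second_row, third_row, fourth_row])

-- ===== PORT B =====
-- _COLUMN = {str(v): (v, (v+5)%10, (v+6)%10, (v+7)%10) for v in range(10)}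
def pvColumn : PySem.Dict Char (Int × Int × Int × Int) :=
  PySem.Dict.ofList ((PySem.List.pyRange 0 10 1).map (fun v =>
    ((PySem.Int.toStr v).toList.headD ' ',
      (v, PySem.Int.mod (v + 5) 10, PySem.Int.mod (v + 6) 10, PySem.Int.mod (v + 7) 10))))

def generate_grid_from_number_alt (number_str : String) : Option (List (List Int)) :=
  if number_str.toList.length ≠ 4 ∨ ¬ (PySem.Chars.strIsdigit number_str.toList = true) then
    none
  else
    let cols := number_str.toList.map (fun d => (pvColumn.get? d).getD (0, 0, 0, 0))
    -- zip(*cols) on 4-tuples: row i collects the i-th component of every column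
    some [cols.map (fun c => c.1), cols.map (fun c => c.2.1),
          cols.map (fun c => c.2.2.1), cols.map (fun c => c.2.2.2)]

-- ===== PRECONDITION & SPEC =====
def Spec_generate_grid_from_number (number_str : String) (out : Option (List (List Int))) : Prop := out = generate_grid_from_number_alt number_str
instance (number_str : String) (out : Option (List (List Int))) : Decidable (Spec_generate_grid_from_number number_str out) := by unfold Spec_generate_grid_from_number; infer_instance

-- ===== CLAIM (what is proved, stated in full; the proofs are below) =====
def Claim_equal_generate_grid_from_number : Prop := ∀ (number_str : String), Dom_generate_grid_from_number number_str → Spec_generate_grid_from_number number_str (generate_grid_from_number number_str)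

-- ===== LEMMAS AND PROOFS =====

theorem pv_digit_cases (c : Char) (h : PySem.Chars.isdigit c = true) :
    c = '0' ∨ c = '1' ∨ c = '2' ∨ c = '3' ∨ c = '4' ∨
    c = '5' ∨ c = '6' ∨ c = '7' ∨ c = '8' ∨ c = '9' := by
  simp only [PySem.Chars.isdigit, Bool.and_eq_true, decide_eq_true_eq] at h
  obtain ⟨h1, h2⟩ := h
  have hlo : 48 ≤ c.toNat := h1
  have hhi : c.toNat ≤ 57 := h2
  have h3 : c.toNat = 48 ∨ c.toNat = 49 ∨ c.toNat = 50 ∨ c.toNat = 51 ∨ c.toNat = 52 ∨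
      c.toNat = 53 ∨ c.toNat = 54 ∨ c.toNat = 55 ∨ c.toNat = 56 ∨ c.toNat = 57 := by omega
  rcases h3 with h3 | h3 | h3 | h3 | h3 | h3 | h3 | h3 | h3 | h3 <;>
    rw [← Char.ofNat_toNat c, h3] <;> simp

theorem pv_char_row1 (c : Char) (h : PySem.Chars.isdigit c = true) :
    (PySem.Int.ofChars? [c]).getD 0 = ((pvColumn.get? c).getD (0, 0, 0, 0)).1 := by
  rcases pv_digit_cases c h with h | h | h | h | h | h | h | h | h | h <;> subst h <;> decide

theorem pv_char_row2 (c : Char) (h : PySem.Chars.isdigit c = true) :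
    (pvFormulaMap.get? c).getD 0 = ((pvColumn.get? c).getD (0, 0, 0, 0)).2.1 := by
  rcases pv_digit_cases c h with h | h | h | h | h | h | h | h | h | h <;> subst h <;> decide

theorem pv_char_row3 (c : Char) (h : PySem.Chars.isdigit c = true) :
    PySem.Int.mod ((pvFormulaMap.get? c).getD 0 + 1) 10 =
      ((pvColumn.get? c).getD (0, 0, 0, 0)).2.2.1 := by
  rcases pv_digit_cases c h with h | h | h | h | h | h | h | h | h | h <;> subst h <;> decide

theorem pv_char_row4 (c : Char) (h : PySem.Chars.isdigit c = true) :
    PySem.Int.mod ((pvFormulaMap.get? c).getD 0 + 2) 10 =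
      ((pvColumn.get? c).getD (0, 0, 0, 0)).2.2.2 := by
  rcases pv_digit_cases c h with h | h | h | h | h | h | h | h | h | h <;> subst h <;> decide

-- ===== VERDICT (by name: the statement is the Claim_ definition above) =====
theorem generate_grid_from_number_spec : Claim_equal_generate_grid_from_number := by
  intro s _
  unfold Spec_generate_grid_from_number generate_grid_from_number generate_grid_from_number_alt
  by_cases hg : s.toList.length ≠ 4 ∨ ¬ (PySem.Chars.strIsdigit s.toList = true)
  · simp only [if_pos hg]
  · simp only [if_neg hg]
    push Not at hg
    have hdig : ∀ c ∈ s.toList, PySem.Chars.isdigit c = true := by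
      intro c hc
      have h2 := hg.2
      simp only [PySem.Chars.strIsdigit, Bool.and_eq_true, List.all_eq_true] at h2
      exact h2.2 c hc
    simp only [List.map_map, List.singleton_append, Option.some.injEq, List.cons.injEq,
      Function.comp_def, and_true]
    refine ⟨?_, ?_, ?_, ?_⟩ <;>
      refine List.map_congr_left (fun c hc => ?_)
    · exact pv_char_row1 c (hdig c hc)
    · exact pv_char_row2 c (hdig c hc)
    · exact pv_char_row3 c (hdig c hc)
    · exact pv_char_row4 c (hdig c hc)
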